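-- pv_equiv track=rewrite | github.com/ivanpeng/advent-of-code | day_9_1.py | remove_garbage_between_brackets
-- ===== SOURCE A (Python) =====
-- def remove_garbage_between_brackets(input):
--     # remove characters only
--     new_str_arr = []
--     is_char_between_brackets = False
--     for char in input:
--         if char == '<':
--             is_char_between_brackets = True
--             continue
--         elif char == '>' and is_char_between_brackets:
--             is_char_between_brackets = False
--             continue
--         elif is_char_between_brackets:
--             continue
--         new_str_arr.append(char)
--     return "".join(new_str_arr)
-- ===== SOURCE B (Python) =====
-- import re
--
-- def remove_garbage_between_brackets(input):
--     # Single regex substitution: '<', then non-'>' run, then optional '>'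
--     # (optional so an unterminated '<' strips to end of string).
--     return re.sub(r'<[^>]*>?', '', input)
-- ===== Notes on version B (the rewrite author's own statement) =====
-- stated objective: idiomatic
-- what changed: Replaced the manual flag-state character loop with a single regex substitution (pattern: an opening angle bracket, a run of non-closing-bracket characters, an optional closing bracket) that deletes each bracketed span, including an unterminated trailing one, in one re.sub call.
import Mathlib
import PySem

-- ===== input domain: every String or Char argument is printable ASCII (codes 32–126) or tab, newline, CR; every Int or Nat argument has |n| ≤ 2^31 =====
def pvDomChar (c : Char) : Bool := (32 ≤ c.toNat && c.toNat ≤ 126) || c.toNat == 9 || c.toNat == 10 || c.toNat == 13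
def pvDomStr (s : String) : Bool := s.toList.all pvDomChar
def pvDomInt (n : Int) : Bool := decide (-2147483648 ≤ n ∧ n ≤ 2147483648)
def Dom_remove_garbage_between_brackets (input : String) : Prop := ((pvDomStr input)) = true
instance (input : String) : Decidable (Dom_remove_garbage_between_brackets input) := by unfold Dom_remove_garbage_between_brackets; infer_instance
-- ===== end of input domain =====

-- B replaces the manual flag-state loop with a single regex substitution (more idiomatic); ports proved equal on all inputs.


-- ===== PORT A =====
-- literal transliteration of A's flag loop: fold over the characters with (accumulated list, flag)
def remove_garbage_between_brackets (input : String) : String :=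
  let st := input.toList.foldl
    (fun (st : List Char × Bool) c =>
      if c = '<' then (st.1, true)
      else if c = '>' ∧ st.2 then (st.1, false)
      else if st.2 then st
      else (st.1 ++ [c], st.2))
    ([], false)
  String.mk st.1

-- ===== PORT B =====
-- hand port of the regex r'<[^>]*>?' used in Source B's re.sub (PySem has no regex):
-- pvSkipGarbage consumes the '[^>]*>?' part (drop up to and including the first '>',
-- or everything if none); exact for this pattern on every input.
def pvSkipGarbage : List Char → List Char
  | [] => []
  | c :: cs => if c = '>' then cs else pvSkipGarbage cs

theorem pvSkipGarbage_length_le (cs : List Char) : (pvSkipGarbage cs).length ≤ cs.length := by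
  induction cs with
  | nil => simp [pvSkipGarbage]
  | cons c cs ih =>
    simp only [pvSkipGarbage]
    split
    · simp
    · simp; omega

-- re.sub: copy characters, and at each '<' delete the whole regex match
def pvRegexSub : List Char → List Char
  | [] => []
  | c :: cs =>
    if c = '<' then pvRegexSub (pvSkipGarbage cs)
    else c :: pvRegexSub cs
termination_by cs => cs.length
decreasing_by
  · have := pvSkipGarbage_length_le cs; simp; omega
  · simp

def remove_garbage_between_brackets_alt (input : String) : String :=
  String.mk (pvRegexSub input.toList)

-- ===== PRECONDITION & SPEC =====
def Spec_remove_garbage_between_brackets (input : String) (out : String) : Prop := out = remove_garbage_between_brackets_alt input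
instance (input : String) (out : String) : Decidable (Spec_remove_garbage_between_brackets input out) := by unfold Spec_remove_garbage_between_brackets; infer_instance

-- ===== CLAIM (what is proved, stated in full; the proofs are below) =====
def Claim_equal_remove_garbage_between_brackets : Prop := ∀ (input : String), Dom_remove_garbage_between_brackets input → Spec_remove_garbage_between_brackets input (remove_garbage_between_brackets input)

-- ===== LEMMAS AND PROOFS =====

-- the loop body of port A, named for the invariant lemma
def pvStepA (st : List Char × Bool) (c : Char) : List Char × Bool :=
  if c = '<' then (st.1, true)
  else if c = '>' ∧ st.2 then (st.1, false)
  else if st.2 then st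
  else (st.1 ++ [c], st.2)

-- loop invariant: from flag=false the fold produces acc ++ pvRegexSub cs;
-- from flag=true it produces acc ++ pvRegexSub (pvSkipGarbage cs)
theorem pvLoopA_invN (n : Nat) : ∀ (cs : List Char), cs.length ≤ n → ∀ acc : List Char,
    (cs.foldl pvStepA (acc, false)).1 = acc ++ pvRegexSub cs ∧
    (cs.foldl pvStepA (acc, true)).1 = acc ++ pvRegexSub (pvSkipGarbage cs) := by
  induction n with
  | zero =>
    intro cs hcs
    match cs, hcs with
    | [], _ => intro acc; simp [pvRegexSub, pvSkipGarbage]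
  | succ n ihn =>
    intro cs hcs
    have ih : ∀ cs' : List Char, cs'.length ≤ n → ∀ acc : List Char,
        (cs'.foldl pvStepA (acc, false)).1 = acc ++ pvRegexSub cs' ∧
        (cs'.foldl pvStepA (acc, true)).1 = acc ++ pvRegexSub (pvSkipGarbage cs') := ihn
    match cs, hcs with
    | [], _ => intro acc; simp [pvRegexSub, pvSkipGarbage]
    | c :: cs, hcs =>
      have hlen : cs.length ≤ n := by simp at hcs; omega
      intro acc
      constructor
      · by_cases h : c = '<'
        · subst h
          simp only [List.foldl_cons, pvStepA, pvRegexSub]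
          exact (ih cs hlen acc).2
        · simp only [List.foldl_cons, pvStepA, if_neg h]
          have : ¬ (c = '>' ∧ False) := by simp
          simp only [if_neg (by simp : ¬ (c = '>' ∧ (false : Bool) = true)), if_neg (by simp : ¬ ((false : Bool) = true))]
          rw [pvRegexSub, if_neg h, (ih cs hlen (acc ++ [c])).1]
          simp
      · by_cases hgt : c = '>'
        · subst hgt
          have h1 : pvStepA (acc, true) '>' = (acc, false) := by simp [pvStepA]
          rw [List.foldl_cons, h1, pvSkipGarbage, if_pos rfl]
          exact (ih cs hlen acc).1
        · by_cases hlt : c = '<'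
          · subst hlt
            simp only [List.foldl_cons, pvStepA]
            rw [pvSkipGarbage, if_neg (by decide : ¬ ('<' : Char) = '>')]
            exact (ih cs hlen acc).2
          · have h1 : pvStepA (acc, true) c = (acc, true) := by
              simp [pvStepA, hlt, hgt]
            rw [List.foldl_cons, h1, pvSkipGarbage, if_neg hgt]
            exact (ih cs hlen acc).2

theorem pvLoopA_inv (cs : List Char) : ∀ acc : List Char,
    (cs.foldl pvStepA (acc, false)).1 = acc ++ pvRegexSub cs ∧
    (cs.foldl pvStepA (acc, true)).1 = acc ++ pvRegexSub (pvSkipGarbage cs) :=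
  pvLoopA_invN cs.length cs le_rfl

-- ===== VERDICT (by name: the statement is the Claim_ definition above) =====
theorem remove_garbage_between_brackets_spec : Claim_equal_remove_garbage_between_brackets := by
  intro input _
  unfold Spec_remove_garbage_between_brackets remove_garbage_between_brackets remove_garbage_between_brackets_alt
  have h := (pvLoopA_inv input.toList []).1
  simp only []
  have hstep : (fun (st : List Char × Bool) c =>
      if c = '<' then (st.1, true)
      else if c = '>' ∧ st.2 then (st.1, false)
      else if st.2 then st
      else (st.1 ++ [c], st.2)) = pvStepA := by funext st c; rfl
  rw [hstep, h]
  simp
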